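-- pv_equiv track=rewrite | github.com/atulvinod/leetcoding | python-dsa/cfDoubleDStrings.py | solve
-- ===== SOURCE A (Python) =====
-- def solve(strings):
--     result = ["0"]*len(strings)
--     string_tuples = set(strings)
--     strings = sorted([(value, index) for index, value in enumerate(strings)]
-- , key= lambda x : len(x[0]))
--
--     for i in range(len(strings)-1, -1, -1):
--         for k in range(len(strings[i][0])):
--             x = strings[i]
--             a = x[0][0:k+1]
--             b = x[0][k+1:]
--             if a in string_tuples and b in string_tuples:
--                 result[strings[i][1]] = "1"
--                 break
--
--     final_result =  ''.join(result)
--     return final_result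
-- ===== SOURCE B (Python) =====
-- def solve(strings):
--     words = set(strings)
--     doubles = {u + v for u in words if u for v in words}
--     return ''.join("1" if s in doubles else "0" for s in strings)
-- ===== Notes on version B (the rewrite author's own statement) =====
-- stated objective: alternative
-- what changed: B never splits any string: it builds the set of all concatenations u+v of a nonempty distinct word u with a distinct word v, then marks each input string by a single membership test in that set, replacing A's sort-by-length, reversed index loop and per-string prefix/suffix split scan.
import Mathlib
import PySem

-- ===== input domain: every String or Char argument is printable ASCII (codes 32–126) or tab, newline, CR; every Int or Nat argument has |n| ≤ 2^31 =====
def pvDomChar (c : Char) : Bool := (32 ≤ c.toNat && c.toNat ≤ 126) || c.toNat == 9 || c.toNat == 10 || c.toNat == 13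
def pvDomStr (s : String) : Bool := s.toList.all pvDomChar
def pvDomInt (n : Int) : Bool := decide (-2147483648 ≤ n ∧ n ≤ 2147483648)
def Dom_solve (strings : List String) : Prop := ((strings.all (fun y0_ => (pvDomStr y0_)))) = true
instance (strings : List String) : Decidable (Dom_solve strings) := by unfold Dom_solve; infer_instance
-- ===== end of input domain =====

-- B never splits a string: it builds the set of all concatenations u+v (u a nonempty distinct
-- word, v a distinct word) and marks each input string by one membership test (objective: alternative).

-- ===== PORT A =====
-- literal port of A: result array of "0"s, set of the strings, pairs (value, index) sorted by
-- len(value), reversed index loop; the inner 'for k … if …: mark; break' only sets result[index]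
-- to "1" on the first hit, so it is ported as '.any' over range(len(value)).
def solve (strings : List String) : String :=
  let result := List.replicate strings.length "0"
  let string_tuples := PySem.Set.ofList strings
  let sp := PySem.List.sorted ((PySem.List.enumerate strings 0).map (fun p => (p.2, p.1)))
              (fun x => PySem.Str.len x.1) false
  let result := (PySem.List.pyRange ((sp.length : Int) - 1) (-1) (-1)).foldl
    (fun res i =>
      let x := PySem.List.pyGetD sp i ("", 0)
      if (PySem.List.pyRange 0 (PySem.Str.len x.1) 1).any (fun k =>
            PySem.Set.contains string_tuples (PySem.Str.slice x.1 (some 0) (some (k + 1))) &&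
            PySem.Set.contains string_tuples (PySem.Str.slice x.1 (some (k + 1)) none))
      then PySem.List.pySetD res x.2 "1" else res) result
  PySem.Str.join "" result

-- ===== PORT B =====
-- literal port of B: words = set(strings); doubles = {u + v for u in words if u for v in words}
-- (a set built from a set's elements — order-independent); one membership test per input string.
def solve_alt (strings : List String) : String :=
  let words := PySem.Set.ofList strings
  let doubles := words.foldl (fun d u =>
      if u ≠ "" then words.foldl (fun d v => PySem.Set.add d (u ++ v)) d else d)
    PySem.Set.empty
  PySem.Str.join "" (strings.map (fun s => if PySem.Set.contains doubles s then "1" else "0"))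

-- ===== PRECONDITION & SPEC =====
def Spec_solve (strings : List String) (out : String) : Prop := out = solve_alt strings
instance (strings : List String) (out : String) : Decidable (Spec_solve strings out) := by unfold Spec_solve; infer_instance

-- ===== CLAIM (what is proved, stated in full; the proofs are below) =====
def Claim_equal_solve : Prop := ∀ (strings : List String), Dom_solve strings → Spec_solve strings (solve strings)

-- ===== LEMMAS AND PROOFS =====

-- the split condition exactly as A's inner loop tests it, parametric in the set
def condA (t : PySem.Set String) (s : String) : Bool :=
  (PySem.List.pyRange 0 (PySem.Str.len s) 1).any (fun k =>
    PySem.Set.contains t (PySem.Str.slice s (some 0) (some (k + 1))) &&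
    PySem.Set.contains t (PySem.Str.slice s (some (k + 1)) none))

theorem contains_iff_mem (t : PySem.Set String) (x : String) :
    PySem.Set.contains t x = true ↔ x ∈ t := by
  simp [PySem.Set.contains]

-- A's inner-loop condition, characterised over natural split points
theorem condA_iff (t : PySem.Set String) (s : String) :
    condA t s = true ↔ ∃ j : Nat, j < s.toList.length ∧
      PySem.Str.slice s none (some ((j : Int) + 1)) ∈ t ∧
      PySem.Str.slice s (some ((j : Int) + 1)) none ∈ t := by
  unfold condA
  rw [PySem.List.pyRange_one 0 (PySem.Str.len s), List.any_map, List.any_eq_true]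
  constructor
  · rintro ⟨k, hk, hcond⟩
    rw [List.mem_range] at hk
    refine ⟨k, ?_, ?_, ?_⟩
    · have := PySem.Str.len_eq s; omega
    · have h2 : PySem.Str.slice s (some 0) (some (0 + (k:Int) + 1))
          = PySem.Str.slice s none (some ((k:Int) + 1)) := by
        rw [← String.toList_inj, PySem.Str.toList_slice, PySem.Str.toList_slice]
        simp [PySem.Chars.slice_eq_listSlice]
      simp only [Function.comp] at hcond
      rw [Bool.and_eq_true, contains_iff_mem, contains_iff_mem] at hcond
      rw [← h2]
      convert hcond.1 using 3
    · simp only [Function.comp] at hcond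
      rw [Bool.and_eq_true, contains_iff_mem, contains_iff_mem] at hcond
      convert hcond.2 using 4
      omega
  · rintro ⟨j, hj, h1, h2⟩
    refine ⟨j, ?_, ?_⟩
    · rw [List.mem_range]
      have := PySem.Str.len_eq s; omega
    · simp only [Function.comp]
      rw [Bool.and_eq_true, contains_iff_mem, contains_iff_mem]
      constructor
      · have heq : PySem.Str.slice s (some 0) (some (0 + (j:Int) + 1))
            = PySem.Str.slice s none (some ((j:Int) + 1)) := by
          rw [← String.toList_inj, PySem.Str.toList_slice, PySem.Str.toList_slice]
          simp [PySem.Chars.slice_eq_listSlice]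
        rw [heq]; exact h1
      · have heq : PySem.Str.slice s (some (0 + (j:Int) + 1)) none
            = PySem.Str.slice s (some ((j:Int) + 1)) none := by norm_num
        rw [heq]; exact h2

-- membership in an inner fold adding the concatenations u ++ v for v in a list
theorem mem_foldl_add (u : String) (L : List String) (d : PySem.Set String) (x : String) :
    x ∈ L.foldl (fun d v => PySem.Set.add d (u ++ v)) d ↔ x ∈ d ∨ ∃ v ∈ L, x = u ++ v := by
  induction L generalizing d with
  | nil => simp
  | cons a t ih =>
    rw [List.foldl_cons, ih, PySem.Set.mem_add]
    constructor
    · rintro (⟨hd | rfl⟩ | ⟨v, hv, rfl⟩)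
      · exact Or.inl hd
      · exact Or.inr ⟨a, by simp⟩
      · exact Or.inr ⟨v, by simp [hv]⟩
    · rintro (hd | ⟨v, hv, rfl⟩)
      · exact Or.inl (Or.inl hd)
      · rcases List.mem_cons.mp hv with rfl | hv
        · exact Or.inl (Or.inr rfl)
        · exact Or.inr ⟨v, hv, rfl⟩

-- membership in B's 'doubles' set
theorem mem_doubles (words : PySem.Set String) (L : List String) (d : PySem.Set String)
    (x : String) :
    x ∈ L.foldl (fun d u =>
        if u ≠ "" then words.foldl (fun d v => PySem.Set.add d (u ++ v)) d else d) d
      ↔ x ∈ d ∨ ∃ u ∈ L, u ≠ "" ∧ ∃ v ∈ words, x = u ++ v := by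
  induction L generalizing d with
  | nil => simp
  | cons a t ih =>
    rw [List.foldl_cons, ih]
    by_cases ha : a = ""
    · subst ha
      simp only [ne_eq, not_true_eq_false, if_false]
      constructor
      · rintro (hd | h)
        · exact Or.inl hd
        · exact Or.inr (by obtain ⟨u, hu, h⟩ := h; exact ⟨u, by simp [hu], h⟩)
      · rintro (hd | ⟨u, hu, hne, h⟩)
        · exact Or.inl hd
        · rcases List.mem_cons.mp hu with rfl | hu
          · exact absurd rfl hne
          · exact Or.inr ⟨u, hu, hne, h⟩
    · rw [if_pos ha]
      rw [mem_foldl_add]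
      constructor
      · rintro (⟨hd | ⟨v, hv, rfl⟩⟩ | ⟨u, hu, hne, h⟩)
        · exact Or.inl hd
        · exact Or.inr ⟨a, by simp, ha, v, hv, rfl⟩
        · exact Or.inr ⟨u, by simp [hu], hne, h⟩
      · rintro (hd | ⟨u, hu, hne, v, hv, rfl⟩)
        · exact Or.inl (Or.inl hd)
        · rcases List.mem_cons.mp hu with rfl | hu
          · exact Or.inl (Or.inr ⟨v, hv, rfl⟩)
          · exact Or.inr ⟨u, hu, hne, v, hv, rfl⟩

-- existence of a good split point ↔ s is a concatenation of a nonempty word and a word of t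
theorem split_iff_concat (t : PySem.Set String) (s : String) :
    (∃ j : Nat, j < s.toList.length ∧
        PySem.Str.slice s none (some ((j : Int) + 1)) ∈ t ∧
        PySem.Str.slice s (some ((j : Int) + 1)) none ∈ t)
      ↔ ∃ u ∈ t, u ≠ "" ∧ ∃ v ∈ t, s = u ++ v := by
  constructor
  · rintro ⟨j, hj, h1, h2⟩
    refine ⟨PySem.Str.slice s none (some ((j : Int) + 1)), h1, ?_,
            PySem.Str.slice s (some ((j : Int) + 1)) none, h2, ?_⟩
    · intro h
      have := congrArg String.toList h
      rw [PySem.Str.toList_slice] at this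
      have hc : ((j : Int) + 1) = (((j + 1 : Nat) : Int)) := by push_cast; ring
      rw [hc, PySem.Chars.slice_eq_listSlice, PySem.List.slice_to_natCast] at this
      have hlen := congrArg List.length this
      rw [List.length_take] at hlen
      have hnil : ("" : String).toList = [] := rfl
      rw [hnil] at hlen
      simp only [List.length_nil] at hlen
      omega
    · rw [← String.toList_inj, String.toList_append, PySem.Str.toList_slice,
          PySem.Str.toList_slice]
      have hc : ((j : Int) + 1) = (((j + 1 : Nat) : Int)) := by push_cast; ring
      rw [hc, PySem.Chars.slice_eq_listSlice, PySem.Chars.slice_eq_listSlice,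
          PySem.List.slice_to_natCast, PySem.List.slice_from_natCast, List.take_append_drop]
  · rintro ⟨u, hu, hne, v, hv, rfl⟩
    have hunil : u.toList ≠ [] := by
      intro h
      exact hne (String.toList_inj.mp (by simp [h]))
    have hupos : 0 < u.toList.length := List.length_pos_iff.mpr hunil
    refine ⟨u.toList.length - 1, ?_, ?_, ?_⟩
    · rw [String.toList_append, List.length_append]; omega
    · have hc : ((↑(u.toList.length - 1) : Int) + 1) = ((u.toList.length : Nat) : Int) := by
        omega
      rw [hc]
      have : PySem.Str.slice (u ++ v) none (some ((u.toList.length : Nat) : Int)) = u := by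
        rw [← String.toList_inj, PySem.Str.toList_slice, PySem.Chars.slice_eq_listSlice,
            PySem.List.slice_to_natCast, String.toList_append, List.take_left]
      rw [this]; exact hu
    · have hc : ((↑(u.toList.length - 1) : Int) + 1) = ((u.toList.length : Nat) : Int) := by
        omega
      rw [hc]
      have : PySem.Str.slice (u ++ v) (some ((u.toList.length : Nat) : Int)) none = v := by
        rw [← String.toList_inj, PySem.Str.toList_slice, PySem.Chars.slice_eq_listSlice,
            PySem.List.slice_from_natCast, String.toList_append, List.drop_left]
      rw [this]; exact hv

-- A's loop body on a (value, index) pair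
def markStep (c : String → Bool) (res : List String) (p : String × Int) : List String :=
  if c p.1 then PySem.List.pySetD res p.2 "1" else res

theorem length_markStep (c : String → Bool) (res : List String) (p : String × Int) :
    (markStep c res p).length = res.length := by
  simp only [markStep]; split <;> simp [PySem.List.length_pySetD]

theorem getElem?_foldl_mark (c : String → Bool) (L : List (String × Int)) (res : List String)
    (j : Nat) (hj : j < res.length) (hL : ∀ p ∈ L, 0 ≤ p.2) :
    (L.foldl (markStep c) res)[j]? =
      if ∃ p ∈ L, p.2.toNat = j ∧ c p.1 = true then some "1" else res[j]? := by
  induction L generalizing res with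
  | nil => simp
  | cons p t ih =>
    have hp : (0:Int) ≤ p.2 := hL p (by simp)
    have hstep := length_markStep c res p
    rw [List.foldl_cons, ih (markStep c res p) (hstep ▸ hj) (fun q hq => hL q (by simp [hq]))]
    by_cases hex : ∃ q ∈ t, q.2.toNat = j ∧ c q.1 = true
    · rw [if_pos hex, if_pos]
      obtain ⟨q, hq, h2⟩ := hex
      exact ⟨q, List.mem_cons_of_mem _ hq, h2⟩
    · rw [if_neg hex]
      by_cases hpj : p.2.toNat = j ∧ c p.1 = true
      · rw [if_pos ⟨p, List.mem_cons_self, hpj⟩]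
        simp only [markStep, hpj.2, if_true]
        rw [PySem.List.pySetD_of_nonneg _ _ hp, List.getElem?_set, if_pos hpj.1,
            if_pos (hpj.1 ▸ hj)]
      · rw [if_neg]
        · by_cases hc : c p.1 = true
          · have hne : p.2.toNat ≠ j := fun h => hpj ⟨h, hc⟩
            simp only [markStep, hc, if_true]
            rw [PySem.List.pySetD_of_nonneg _ _ hp, List.getElem?_set, if_neg hne]
          · simp [markStep, hc]
        · rintro ⟨q, hq, hqj⟩
          rcases List.mem_cons.mp hq with rfl | hq
          · exact hpj hqj
          · exact hex ⟨q, hq, hqj⟩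

-- membership in A's sorted (value, index) list
theorem mem_sp (strings : List String) (p : String × Int) :
    p ∈ PySem.List.sorted ((PySem.List.enumerate strings 0).map (fun q => (q.2, q.1)))
          (fun x => PySem.Str.len x.1) false
      ↔ ∃ k : Nat, ∃ _ : k < strings.length, p = (strings[k], (k : Int)) := by
  rw [PySem.List.mem_sorted, List.mem_map]
  constructor
  · rintro ⟨q, hq, rfl⟩
    obtain ⟨k, hk, rfl⟩ := (PySem.List.mem_enumerate_iff strings 0 q).mp hq
    exact ⟨k, hk, by simp⟩
  · rintro ⟨k, hk, rfl⟩
    exact ⟨((k : Int), strings[k]), (PySem.List.mem_enumerate_iff strings 0 _).mpr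
      ⟨k, hk, by simp⟩, rfl⟩

theorem length_foldl_mark (c : String → Bool) (L : List (String × Int)) (res : List String) :
    (L.foldl (markStep c) res).length = res.length := by
  induction L generalizing res with
  | nil => rfl
  | cons p t ih => rw [List.foldl_cons, ih, length_markStep]

-- A computes the "0"/"1" mark of each string in place: its result list is a map.
theorem solve_eq (strings : List String) :
    solve strings = PySem.Str.join ""
      (strings.map (fun s => if condA (PySem.Set.ofList strings) s then "1" else "0")) := by
  unfold solve
  dsimp only
  apply congrArg
  set T := PySem.Set.ofList strings with hT
  set sp := PySem.List.sorted ((PySem.List.enumerate strings 0).map (fun q => (q.2, q.1)))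
              (fun x => PySem.Str.len x.1) false with hsp
  have hlen : sp.length = strings.length := by
    simp [hsp, PySem.List.length_sorted, PySem.List.length_enumerate]
  have hrange : PySem.List.pyRange ((sp.length : Int) - 1) (-1) (-1)
      = (PySem.List.pyRange 0 (sp.length : Int) 1).reverse := by
    rw [PySem.List.pyRange_neg_one_eq_reverse]
    norm_num
  have hbody : (fun (res : List String) (i : Int) =>
        let x := PySem.List.pyGetD sp i ("", 0)
        if (PySem.List.pyRange 0 (PySem.Str.len x.1) 1).any (fun k =>
              PySem.Set.contains T (PySem.Str.slice x.1 (some 0) (some (k + 1))) &&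
              PySem.Set.contains T (PySem.Str.slice x.1 (some (k + 1)) none))
        then PySem.List.pySetD res x.2 "1" else res)
      = (fun res i => markStep (condA T) res (PySem.List.pyGetD sp i ("", 0))) := by
    funext res i
    rfl
  rw [hrange, hbody]
  have hfold : (PySem.List.pyRange 0 (sp.length : Int) 1).reverse.foldl
        (fun res i => markStep (condA T) res (PySem.List.pyGetD sp i ("", 0)))
        (List.replicate strings.length "0")
      = sp.reverse.foldl (markStep (condA T)) (List.replicate strings.length "0") := by
    rw [← List.foldl_map (f := fun i => PySem.List.pyGetD sp i ("", 0)),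
        List.map_reverse, PySem.List.map_pyGetD_pyRange_zero']
  rw [hfold]
  have hmem : ∀ p ∈ sp.reverse, ∃ k : Nat, ∃ _ : k < strings.length, p = (strings[k], (k : Int)) := by
    intro p hp
    rw [List.mem_reverse, hsp] at hp
    exact (mem_sp strings p).mp hp
  apply List.ext_getElem?
  intro j
  by_cases hjn : j < strings.length
  · rw [getElem?_foldl_mark (condA T) sp.reverse (List.replicate strings.length "0") j
        (by simpa using hjn) (fun p hp => by obtain ⟨k, hk, rfl⟩ := hmem p hp; positivity)]
    have hiff : (∃ p ∈ sp.reverse, p.2.toNat = j ∧ condA T p.1 = true)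
        ↔ condA T strings[j] = true := by
      constructor
      · rintro ⟨p, hp, hpj, hc⟩
        obtain ⟨k, hk, rfl⟩ := hmem p hp
        simp only at hpj hc
        have : k = j := by simpa using hpj
        subst this; exact hc
      · intro hc
        refine ⟨(strings[j], (j : Int)), ?_, by simpa using hc⟩
        rw [List.mem_reverse]
        exact (mem_sp strings _).mpr ⟨j, hjn, rfl⟩
    rw [List.getElem?_map, List.getElem?_eq_getElem hjn]
    by_cases hc : condA T strings[j] = true
    · rw [if_pos (hiff.mpr hc)]
      simp [hc]
    · rw [if_neg (fun h => hc (hiff.mp h))]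
      simp [hjn, hc]
  · rw [List.getElem?_eq_none, List.getElem?_eq_none]
    · simpa using hjn
    · rw [length_foldl_mark]
      simpa using hjn

-- ===== VERDICT (by name: the statement is the Claim_ definition above) =====
theorem solve_spec : Claim_equal_solve := by
  intro strings _
  unfold Spec_solve solve_alt
  rw [solve_eq]
  dsimp only
  apply congrArg
  apply List.map_congr_left
  intro s _
  have hkey : condA (PySem.Set.ofList strings) s
      = PySem.Set.contains
          ((PySem.Set.ofList strings).foldl (fun d u =>
              if u ≠ "" then (PySem.Set.ofList strings).foldl
                  (fun d v => PySem.Set.add d (u ++ v)) d else d)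
            PySem.Set.empty) s := by
    rw [Bool.eq_iff_iff, condA_iff, contains_iff_mem, mem_doubles, split_iff_concat]
    simp [PySem.Set.empty]
  rw [hkey]
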